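-- pv_equiv track=rewrite | github.com/vterreno/ejercicios-curso-python | Ejercicios/Ejercicio #13 - Volumen 1 - 167 - Pintando Fractales/AbrilCarballo.py | fractal
-- ===== SOURCE A (Python) =====
-- def fractal(n):
--     exponente = 1
--     total = 4 * n
--     while n != 1:
--         n = n // 2
--         total += (4 * n) * (4 ** exponente)
--         exponente += 1
--     return total
-- ===== SOURCE B (Python) =====
-- def fractal(n):
--     if n == 1:
--         return 4
--     return 4 * n + 4 * fractal(n // 2)
-- ===== Notes on version B (the rewrite author's own statement) =====
-- stated objective: simpler
-- what changed: Replaced the iterative accumulator with an explicit exponent counter by a direct recursion on the natural halving recurrence with a constant base case, removing the explicit exponent counter and running total.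
import Mathlib
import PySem

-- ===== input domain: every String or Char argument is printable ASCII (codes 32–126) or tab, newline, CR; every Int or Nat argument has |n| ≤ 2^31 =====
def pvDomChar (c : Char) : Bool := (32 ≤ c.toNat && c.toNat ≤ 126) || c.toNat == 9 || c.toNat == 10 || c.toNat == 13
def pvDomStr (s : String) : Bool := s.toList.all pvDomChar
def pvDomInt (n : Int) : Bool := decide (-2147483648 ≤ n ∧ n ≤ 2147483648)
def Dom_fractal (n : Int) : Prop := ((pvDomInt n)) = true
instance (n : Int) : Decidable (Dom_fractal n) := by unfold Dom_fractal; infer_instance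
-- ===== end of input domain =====

-- B re-expresses A's loop as a direct recursion on the halved argument; equal wherever A returns (A's loop never terminates on non-positive inputs, which Pre_ excludes).
-- ===== PORT A =====
-- while loop of A, with fuel as a totality guard only (n.toNat + 1 iterations always suffice on Pre_)
def fractalLoop : Nat → Int → Int → Int → Int
  | 0, _, _, total => total
  | fuel+1, n, exponente, total =>
    if n = 1 then total
    else
      let n' := PySem.Int.floordiv n 2
      fractalLoop fuel n' (exponente + 1) (total + (4 * n') * 4 ^ exponente.toNat)

def fractal (n : Int) : Int := fractalLoop (n.toNat + 1) n 1 (4 * n)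

-- ===== PORT B =====
-- B's recursion, with fuel as a totality guard only
def fractalRec : Nat → Int → Int
  | 0, _ => 0
  | fuel+1, n =>
    if n = 1 then 4
    else 4 * n + 4 * fractalRec fuel (PySem.Int.floordiv n 2)

def fractal_alt (n : Int) : Int := fractalRec (n.toNat + 1) n

-- ===== PRECONDITION & SPEC =====
-- A's while loop never terminates on non-positive inputs (halving keeps them non-positive), so A returns exactly on positive n.
def Pre_fractal (n : Int) : Prop := 1 ≤ n
instance (n : Int) : Decidable (Pre_fractal n) := by unfold Pre_fractal; infer_instance
def pvWitness_fractal : Int := (5)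
def Spec_fractal (n : Int) (out : Int) : Prop := out = fractal_alt n
instance (n : Int) (out : Int) : Decidable (Spec_fractal n out) := by unfold Spec_fractal; infer_instance

-- ===== CLAIM (what is proved, stated in full; the proofs are below) =====
def Claim_equal_fractal : Prop := ∀ (n : Int), Dom_fractal n → Pre_fractal n → Spec_fractal n (fractal n)

-- ===== LEMMAS AND PROOFS =====

theorem fractalLoop_eq (fuel : Nat) : ∀ (n e total : Int), 1 ≤ n → 1 ≤ e → n.toNat ≤ fuel →
    fractalLoop fuel n e total = total + 4 ^ (e - 1).toNat * (fractalRec fuel n - 4 * n) := by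
  induction fuel with
  | zero => intro n e total hn he hf; omega
  | succ fuel ih =>
    intro n e total hn he hf
    by_cases h1 : n = 1
    · subst h1; simp [fractalLoop, fractalRec]
    · have h2 : 2 ≤ n := by omega
      have hfd : PySem.Int.floordiv n 2 = n / 2 := PySem.Int.floordiv_eq_ediv_of_pos (by omega)
      have hn' : 1 ≤ n / 2 := by omega
      have hlt : n / 2 < n := by omega
      have hf' : (n / 2).toNat ≤ fuel := by omega
      have hrec := ih (n / 2) (e + 1) (total + (4 * (n / 2)) * 4 ^ e.toNat) hn' (by omega) hf'
      simp only [fractalLoop, fractalRec, hfd, h1, if_false]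
      rw [hrec]
      have hpow : (4 : Int) ^ e.toNat = 4 ^ (e - 1).toNat * 4 := by
        have : e.toNat = (e - 1).toNat + 1 := by omega
        rw [this, pow_succ]
      have hpow2 : ((e + 1 - 1).toNat) = (e - 1).toNat + 1 := by omega
      rw [hpow2, pow_succ, hpow]
      ring

-- ===== VERDICT (by name: the statement is the Claim_ definition above) =====
theorem fractal_spec : Claim_equal_fractal := by
  intro n _ hn
  unfold Spec_fractal fractal fractal_alt
  rw [fractalLoop_eq (n.toNat + 1) n 1 (4 * n) hn (by omega) (by omega)]
  simp
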